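-- pv_equiv track=rewrite | github.com/mercedesbenz00/toncli | src/fift_cli/modules/utils/argparse_fix.py | argv_fix
-- ===== SOURCE A (Python) =====
-- from typing import List, Tuple
--
-- def argv_fix(command: List[str]) -> Tuple[List[str], List[str]]:
--     args = []
--     kwargs = []
--
--     next_will_be_kwarg = False
--     for word in command:
--         if '-' == word[0]:
--             next_will_be_kwarg = True
--             kwargs.append(word)
--         elif next_will_be_kwarg:
--             next_will_be_kwarg = False
--             kwargs.append(word)
--         else:
--             args.append(word)
--
--     return args, kwargs
-- ===== SOURCE B (Python) =====
-- from typing import List, Tuple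
--
-- def argv_fix(command: List[str]) -> Tuple[List[str], List[str]]:
--     def is_kw(w, p):
--         return w[0] == '-' or (p is not None and p[0] == '-')
--
--     pairs = list(zip(command, [None] + command))  # pair each word with its predecessor
--     kwargs = [w for w, p in pairs if is_kw(w, p)]
--     args = [w for w, p in pairs if not is_kw(w, p)]
--     return args, kwargs
-- ===== Notes on version B (the rewrite author's own statement) =====
-- stated objective: simpler
-- what changed: Replaced the stateful next_will_be_kwarg flag loop by a stateless classification: each word is paired with its predecessor via zip and classified by 'starts with - or predecessor starts with -', then the two output lists are two comprehensions over those pairs.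
import Mathlib
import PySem

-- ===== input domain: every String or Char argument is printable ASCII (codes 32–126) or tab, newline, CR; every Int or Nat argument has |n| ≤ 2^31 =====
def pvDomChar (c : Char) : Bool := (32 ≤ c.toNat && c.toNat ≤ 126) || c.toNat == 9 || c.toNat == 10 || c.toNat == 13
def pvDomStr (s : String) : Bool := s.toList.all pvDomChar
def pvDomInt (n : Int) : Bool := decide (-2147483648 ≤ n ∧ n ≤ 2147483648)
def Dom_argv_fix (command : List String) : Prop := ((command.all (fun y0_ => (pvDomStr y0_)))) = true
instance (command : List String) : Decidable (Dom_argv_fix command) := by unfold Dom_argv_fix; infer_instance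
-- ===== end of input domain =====

-- B eliminates A's next_will_be_kwarg flag: each word is classified from its own and its
-- predecessor's first character (simpler, stateless); return value equivalence is proved.

-- ===== PORT A =====
-- one iteration of A's loop over state (args, kwargs, next_will_be_kwarg)
def stepA (st : List String × List String × Bool) (word : String) : List String × List String × Bool :=
  let (args, kwargs, next_will_be_kwarg) := st
  if PySem.Str.pyGet? word 0 = some '-' then
    (args, kwargs ++ [word], true)
  else if next_will_be_kwarg then
    (args, kwargs ++ [word], false)
  else
    (args ++ [word], kwargs, next_will_be_kwarg)

def argv_fix (command : List String) : List String × List String :=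
  let r := command.foldl stepA ([], [], false)
  (r.1, r.2.1)

-- ===== PORT B =====
-- is_kw w p : word w (with predecessor p, none at the front) belongs to kwargs
def isKw (w : String) (p : Option String) : Bool :=
  (PySem.Str.pyGet? w 0 == some '-') ||
    (match p with
     | some q => PySem.Str.pyGet? q 0 == some '-'
     | none => false)

def argv_fix_alt (command : List String) : List String × List String :=
  let pairs := command.zip (none :: command.map some)
  let kwargs := (pairs.filter (fun wp => isKw wp.1 wp.2)).map Prod.fst
  let args := (pairs.filter (fun wp => !isKw wp.1 wp.2)).map Prod.fst
  (args, kwargs)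

-- ===== PRECONDITION & SPEC =====
-- Pre_ excludes commands containing an empty word: there the Python A raises IndexError
-- (word[0]); the Python B raises IndexError on the same inputs.
def Pre_argv_fix (command : List String) : Prop := ∀ w ∈ command, w ≠ ""
instance (command : List String) : Decidable (Pre_argv_fix command) := by
  unfold Pre_argv_fix; infer_instance
def pvWitness_argv_fix : List String := ["run", "-v", "file", "x"]
def Spec_argv_fix (command : List String) (out : List String × List String) : Prop := out = argv_fix_alt command
instance (command : List String) (out : List String × List String) : Decidable (Spec_argv_fix command out) := by unfold Spec_argv_fix; infer_instance

-- ===== CLAIM (what is proved, stated in full; the proofs are below) =====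
def Claim_equal_argv_fix : Prop := ∀ (command : List String), Dom_argv_fix command → Pre_argv_fix command → Spec_argv_fix command (argv_fix command)

-- ===== LEMMAS AND PROOFS =====

-- A's flag before processing a word equals "the predecessor started with '-'"
def prevDash (p : Option String) : Bool :=
  match p with
  | some q => PySem.Str.pyGet? q 0 == some '-'
  | none => false

theorem foldA_eq_zip (l : List String) (p : Option String) (a k : List String) :
    (l.foldl stepA (a, k, prevDash p)).1
      = a ++ ((l.zip (p :: l.map some)).filter (fun wp => !isKw wp.1 wp.2)).map Prod.fst
    ∧ (l.foldl stepA (a, k, prevDash p)).2.1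
      = k ++ ((l.zip (p :: l.map some)).filter (fun wp => isKw wp.1 wp.2)).map Prod.fst := by
  induction l generalizing p a k with
  | nil => simp
  | cons w ws ih =>
    by_cases h1 : PySem.List.pyGet? w.toList 0 = some '-'
    · have hk : isKw w p = true := by simp [isKw, PySem.Str.pyGet?, h1]
      have : stepA (a, k, prevDash p) w = (a, k ++ [w], prevDash (some w)) := by
        simp [stepA, PySem.Str.pyGet?, h1, prevDash]
      simpa [this, hk] using ih (some w) a (k ++ [w])
    · have hflag : prevDash (some w) = false := by simp [prevDash, PySem.Str.pyGet?, h1]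
      by_cases h2 : prevDash p = true
      · have hk : isKw w p = true := by
          cases p with
          | none => simp [prevDash] at h2
          | some q => simp [isKw, prevDash] at h2 ⊢; right; exact h2
        have : stepA (a, k, prevDash p) w = (a, k ++ [w], prevDash (some w)) := by
          simp [stepA, PySem.Str.pyGet?, h1, h2, hflag]
        simpa [this, hk] using ih (some w) a (k ++ [w])
      · have hp : prevDash p = false := by simpa using h2
        have hk : isKw w p = false := by
          cases p with
          | none => simp [isKw, PySem.Str.pyGet?, h1]
          | some q => simp [prevDash] at hp; simp [isKw, PySem.Str.pyGet?, h1, hp]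
        have : stepA (a, k, prevDash p) w = (a ++ [w], k, prevDash (some w)) := by
          simp [stepA, PySem.Str.pyGet?, h1, hp, hflag]
        simpa [this, hk] using ih (some w) (a ++ [w]) k

theorem argv_fix_eq (command : List String) : argv_fix command = argv_fix_alt command := by
  have h := foldA_eq_zip command none [] []
  simp [prevDash] at h
  simp [argv_fix, argv_fix_alt, h.1, h.2]

-- ===== VERDICT (by name: the statement is the Claim_ definition above) =====
theorem argv_fix_spec : Claim_equal_argv_fix := by
  intro command _ _
  unfold Spec_argv_fix
  exact argv_fix_eq command
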